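-- pv_equiv track=rewrite | github.com/ENFStudios/mister-companion-macos | core/update_all_config.py | upsert_section_lines
-- ===== SOURCE A (Python) =====
-- def remove_section_from_lines(lines, section):
--     new_lines = []
--     skip = False
--
--     for line in lines:
--         stripped = line.strip()
--
--         if stripped.startswith("[") and stripped.endswith("]"):
--             skip = stripped.strip("[]") == section
--
--         if not skip:
--             new_lines.append(line)
--
--     return new_lines
--
-- def upsert_section_lines(lines, section, new_section_lines):
--     lines = remove_section_from_lines(lines, section)
--
--     while lines and not lines[0].strip():
--         lines.pop(0)
--
--     while lines and not lines[-1].strip():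
--         lines.pop()
--
--     lines.extend(new_section_lines)
--     return lines
-- ===== SOURCE B (Python) =====
-- def _is_header(stripped):
--     return stripped.startswith("[") and stripped.endswith("]")
--
--
-- def _drop_leading_blank(xs):
--     for k, line in enumerate(xs):
--         if line.strip():
--             return xs[k:]
--     return []
--
--
-- def upsert_section_lines(lines, section, new_section_lines):
--     # Partition into blocks: an untagged leading block, then one block per header line.
--     blocks = [(None, [])]
--     for line in lines:
--         stripped = line.strip()
--         if _is_header(stripped):
--             blocks.append((stripped.strip("[]"), []))
--         blocks[-1][1].append(line)
--
--     # Keep every block whose tag is not the removed section, flatten.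
--     kept = [l for tag, block in blocks if tag != section for l in block]
--
--     # Trim blank lines from both ends (front, then back via reversal).
--     core = _drop_leading_blank(_drop_leading_blank(kept)[::-1])[::-1]
--     return core + list(new_section_lines)
-- ===== Notes on version B (the rewrite author's own statement) =====
-- stated objective: alternative
-- what changed: Replaces the single stateful scan with a skip flag and the destructive pop-loops by a partition into header-tagged blocks that are filtered and flattened, followed by a functional dropwhile/reverse trim of blank edge lines.
import Mathlib
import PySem

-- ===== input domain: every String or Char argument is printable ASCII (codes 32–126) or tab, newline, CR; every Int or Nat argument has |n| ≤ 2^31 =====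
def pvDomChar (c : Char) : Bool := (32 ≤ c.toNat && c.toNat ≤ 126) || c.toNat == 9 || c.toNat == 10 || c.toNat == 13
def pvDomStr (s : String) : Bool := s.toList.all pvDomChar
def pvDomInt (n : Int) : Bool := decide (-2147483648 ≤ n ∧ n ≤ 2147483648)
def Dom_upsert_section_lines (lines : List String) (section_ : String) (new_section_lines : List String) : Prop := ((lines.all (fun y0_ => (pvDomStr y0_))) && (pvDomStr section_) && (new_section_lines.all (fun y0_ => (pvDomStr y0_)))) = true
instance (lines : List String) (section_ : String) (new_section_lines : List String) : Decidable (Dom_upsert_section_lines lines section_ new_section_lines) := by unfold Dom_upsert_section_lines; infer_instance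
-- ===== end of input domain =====

-- B replaces the stateful skip-flag scan and destructive pop-loops by a block partition
-- (one tagged block per '[...]' header) that is filtered and flattened, then a functional
-- dropwhile/reverse trim; alternative decomposition, same cost.


-- ===== PORT A =====
-- A's for-loop, as structural recursion carrying the same skip flag
def pvRemoveRec (lines : List String) (section_ : String) (skip : Bool) : List String :=
  match lines with
  | [] => []
  | line :: rest =>
    let stripped := PySem.Str.strip line
    let skip' := if PySem.Str.startswith stripped "[" && PySem.Str.endswith stripped "]"
                 then PySem.Str.stripChars stripped "[]" == section_ else skip
    if skip' then pvRemoveRec rest section_ skip' else line :: pvRemoveRec rest section_ skip'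

def remove_section_from_lines (lines : List String) (section_ : String) : List String :=
  pvRemoveRec lines section_ false

-- 'while lines and not lines[0].strip(): lines.pop(0)'
def pvTrimFront : List String → List String
  | [] => []
  | x :: xs => if PySem.Str.strip x == "" then pvTrimFront xs else x :: xs

-- 'while lines and not lines[-1].strip(): lines.pop()'
def pvTrimEnd (l : List String) : List String :=
  match h : l.getLast? with
  | none => []
  | some x => if PySem.Str.strip x == "" then pvTrimEnd l.dropLast else l
termination_by l.length
decreasing_by
  have hne : l ≠ [] := by intro e; subst e; simp at h
  have : 0 < l.length := List.length_pos_iff.mpr hne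
  simpa [List.length_dropLast] using by omega

def upsert_section_lines (lines : List String) (section_ : String) (new_section_lines : List String) : List String :=
  pvTrimEnd (pvTrimFront (remove_section_from_lines lines section_)) ++ new_section_lines

-- ===== PORT B =====
def pvIsHeader (stripped : String) : Bool :=
  PySem.Str.startswith stripped "[" && PySem.Str.endswith stripped "]"

-- blocks[-1][1].append(line)
def pvAppendLast (bs : List (Option String × List String)) (line : String) : List (Option String × List String) :=
  match bs with
  | [] => []
  | [b] => [(b.1, b.2 ++ [line])]
  | b :: rest => b :: pvAppendLast rest line

def pvBuildBlocks (lines : List String) : List (Option String × List String) :=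
  lines.foldl (fun blocks line =>
    let stripped := PySem.Str.strip line
    let blocks := if pvIsHeader stripped
                  then blocks ++ [(some (PySem.Str.stripChars stripped "[]"), [])]
                  else blocks
    pvAppendLast blocks line) [(none, [])]

-- _drop_leading_blank: first non-blank suffix
def pvDropLeadingBlank : List String → List String
  | [] => []
  | x :: xs => if PySem.Str.strip x != "" then x :: xs else pvDropLeadingBlank xs

def upsert_section_lines_alt (lines : List String) (section_ : String) (new_section_lines : List String) : List String :=
  let blocks := pvBuildBlocks lines
  let kept := (blocks.filter (fun b => b.1 != some section_)).flatMap (·.2)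
  let core := (pvDropLeadingBlank ((pvDropLeadingBlank kept).reverse)).reverse
  core ++ new_section_lines

-- ===== PRECONDITION & SPEC =====
def Spec_upsert_section_lines (lines : List String) (section_ : String) (new_section_lines : List String) (out : List String) : Prop := out = upsert_section_lines_alt lines section_ new_section_lines
instance (lines : List String) (section_ : String) (new_section_lines : List String) (out : List String) : Decidable (Spec_upsert_section_lines lines section_ new_section_lines out) := by unfold Spec_upsert_section_lines; infer_instance

-- ===== CLAIM (what is proved, stated in full; the proofs are below) =====
def Claim_equal_upsert_section_lines : Prop := ∀ (lines : List String) (section_ : String) (new_section_lines : List String), Dom_upsert_section_lines lines section_ new_section_lines → Spec_upsert_section_lines lines section_ new_section_lines (upsert_section_lines lines section_ new_section_lines)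

-- ===== LEMMAS AND PROOFS =====

def pvBlank (x : String) : Bool := PySem.Str.strip x == ""

def pvFlatKept (section_ : String) (bs : List (Option String × List String)) : List String :=
  (bs.filter (fun b => b.1 != some section_)).flatMap (·.2)

def pvSkipOf (section_ : String) (bs : List (Option String × List String)) : Bool :=
  match bs.getLast? with
  | some b => b.1 == some section_
  | none => false

theorem pvDropLeadingBlank_eq (l : List String) :
    pvDropLeadingBlank l = l.dropWhile pvBlank := by
  induction l with
  | nil => rfl
  | cons x xs ih =>
    cases h : (PySem.Str.strip x == "") <;>
      simp [pvDropLeadingBlank, List.dropWhile, pvBlank, bne, h, ih]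

theorem pvTrimFront_eq (l : List String) :
    pvTrimFront l = l.dropWhile pvBlank := by
  induction l with
  | nil => rfl
  | cons x xs ih =>
    cases h : (PySem.Str.strip x == "") <;>
      simp [pvTrimFront, List.dropWhile, pvBlank, h, ih]

theorem pvTrimEnd_eq (l : List String) :
    pvTrimEnd l = l.rdropWhile pvBlank := by
  induction l using List.reverseRecOn with
  | nil => simp [pvTrimEnd, List.rdropWhile]
  | append_singleton ys x ih =>
    rw [pvTrimEnd]
    split
    · next heq => simp at heq
    · next y heq =>
      have hy : x = y := by simpa using heq
      subst hy
      rw [List.rdropWhile_concat, List.dropLast_concat]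
      by_cases h : PySem.Str.strip x = "" <;> simp [pvBlank, h, ih]

theorem pvFlatKept_cons (s : String) (b : Option String × List String)
    (bs : List (Option String × List String)) :
    pvFlatKept s (b :: bs) = (if b.1 = some s then [] else b.2) ++ pvFlatKept s bs := by
  by_cases h : b.1 = some s <;>
    simp [pvFlatKept, h, bne_iff_ne]

theorem pvFlatKept_concat_empty (s : String) (bs : List (Option String × List String))
    (t : Option String) :
    pvFlatKept s (bs ++ [(t, [])]) = pvFlatKept s bs := by
  by_cases h : t = some s <;>
    simp [pvFlatKept, List.filter_append, h, bne_iff_ne]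

theorem pvSkipOf_concat (s : String) (bs : List (Option String × List String))
    (t : Option String) (ls : List String) :
    pvSkipOf s (bs ++ [(t, ls)]) = (t == some s) := by
  simp [pvSkipOf]

theorem pvAppendLast_ne_nil (bs : List (Option String × List String)) (line : String)
    (h : bs ≠ []) : pvAppendLast bs line ≠ [] := by
  match bs with
  | [] => exact absurd rfl h
  | [b] => simp [pvAppendLast]
  | b :: c :: rest => simp [pvAppendLast]

theorem pvSkipOf_appendLast (s : String) (bs : List (Option String × List String))
    (line : String) : pvSkipOf s (pvAppendLast bs line) = pvSkipOf s bs := by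
  match bs with
  | [] => rfl
  | [b] => simp [pvAppendLast, pvSkipOf]
  | b :: c :: rest =>
    have ih := pvSkipOf_appendLast s (c :: rest) line
    have hne := pvAppendLast_ne_nil (c :: rest) line (by simp)
    show pvSkipOf s (b :: pvAppendLast (c :: rest) line) = pvSkipOf s (b :: c :: rest)
    cases hl : pvAppendLast (c :: rest) line with
    | nil => exact absurd hl hne
    | cons d t =>
      rw [hl] at ih
      simpa [pvSkipOf, List.getLast?_cons_cons] using ih

theorem pvFlatKept_appendLast (s : String) (bs : List (Option String × List String))
    (line : String) (h : bs ≠ []) :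
    pvFlatKept s (pvAppendLast bs line) =
      pvFlatKept s bs ++ (if pvSkipOf s bs then [] else [line]) := by
  match bs with
  | [] => exact absurd rfl h
  | [b] =>
    by_cases hb : b.1 = some s <;>
      simp [pvAppendLast, pvFlatKept, pvSkipOf, hb, bne_iff_ne]
  | b :: c :: rest =>
    have ih := pvFlatKept_appendLast s (c :: rest) line (by simp)
    have hs : pvSkipOf s (b :: c :: rest) = pvSkipOf s (c :: rest) := by
      simp [pvSkipOf, List.getLast?_cons_cons]
    rw [show pvAppendLast (b :: c :: rest) line = b :: pvAppendLast (c :: rest) line from rfl,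
        pvFlatKept_cons, ih, hs]
    simp [pvFlatKept_cons, List.append_assoc]

theorem pvBuildBlocks_invariant (s : String) (lines : List String)
    (bs : List (Option String × List String)) (h : bs ≠ []) :
    pvFlatKept s (lines.foldl (fun blocks line =>
      pvAppendLast (if pvIsHeader (PySem.Str.strip line) = true
        then blocks ++ [(some (PySem.Str.stripChars (PySem.Str.strip line) "[]"), [])]
        else blocks) line) bs) =
    pvFlatKept s bs ++ pvRemoveRec lines s (pvSkipOf s bs) := by
  induction lines generalizing bs with
  | nil => simp [pvRemoveRec]
  | cons line rest ih =>
    rw [List.foldl_cons]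
    by_cases hh : pvIsHeader (PySem.Str.strip line) = true
    · rw [if_pos hh]
      set bs1 := bs ++ [(some (PySem.Str.stripChars (PySem.Str.strip line) "[]"), [])] with hbs1
      have h1 : bs1 ≠ [] := by simp [hbs1]
      rw [ih _ (pvAppendLast_ne_nil bs1 line h1)]
      rw [pvSkipOf_appendLast, pvFlatKept_appendLast _ _ _ h1]
      rw [hbs1, pvSkipOf_concat, pvFlatKept_concat_empty]
      rw [pvRemoveRec]
      simp only [pvIsHeader] at hh
      simp only [hh, if_true]
      by_cases hk : PySem.Str.stripChars (PySem.Str.strip line) "[]" = s <;>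
        simp [hk, List.append_assoc]
    · rw [if_neg hh]
      rw [ih _ (pvAppendLast_ne_nil bs line h)]
      rw [pvSkipOf_appendLast, pvFlatKept_appendLast _ _ _ h]
      rw [pvRemoveRec]
      simp only [pvIsHeader] at hh
      rw [eq_false_of_ne_true hh]
      by_cases hk : pvSkipOf s bs = true <;> simp [hk, List.append_assoc]

theorem pvKept_eq (s : String) (lines : List String) :
    pvFlatKept s (pvBuildBlocks lines) = pvRemoveRec lines s false := by
  have h := pvBuildBlocks_invariant s lines [(none, [])] (by simp)
  rw [pvBuildBlocks]
  simp only []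
  rw [h]
  simp [pvFlatKept, pvSkipOf]

-- ===== VERDICT (by name: the statement is the Claim_ definition above) =====
theorem upsert_section_lines_spec : Claim_equal_upsert_section_lines := by
  intro lines section_ new_section_lines _
  unfold Spec_upsert_section_lines
  unfold upsert_section_lines upsert_section_lines_alt remove_section_from_lines
  have hk : ((pvBuildBlocks lines).filter (fun b => b.1 != some section_)).flatMap (·.2)
      = pvRemoveRec lines section_ false := pvKept_eq section_ lines
  simp only [hk]
  rw [pvTrimFront_eq, pvTrimEnd_eq, pvDropLeadingBlank_eq, pvDropLeadingBlank_eq]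
  rw [List.rdropWhile]
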